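-- pv_equiv track=rewrite | github.com/SeaEagleI/BaiduXJTU_BigData_2019_Semi-Final | Stacking-NN/Net6_Features/CalcFeatures.py | SplitHours
-- ===== SOURCE A (Python) =====
-- def SplitHours(hours):
--     slist,period = [],[hours[0]]
--     for i in range(1,len(hours)):
--         if hours[i]-hours[i-1]==1:
--             period.append(hours[i])
--         else:
--             slist.append(period)
--             period = [hours[i]]
--     slist.append(period)
--     result = []
--     for period in slist:
--         result.append([period[0],period[-1]-period[0],period[-1]])
--     return result
-- ===== SOURCE B (Python) =====
-- def SplitHours(hours):
--     start = prev = hours[0]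
--     result = []
--     for h in hours[1:]:
--         if h - prev == 1:
--             prev = h
--         else:
--             result.append([start, prev - start, prev])
--             start = prev = h
--     result.append([start, prev - start, prev])
--     return result
-- ===== Notes on version B (the rewrite author's own statement) =====
-- stated objective: simpler
-- what changed: Single pass keeping only two scalars (run start and previous hour) and emitting each [start, length, end] triple directly, instead of A's two passes that first build a list of run sublists and then map them to triples.
import Mathlib
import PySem

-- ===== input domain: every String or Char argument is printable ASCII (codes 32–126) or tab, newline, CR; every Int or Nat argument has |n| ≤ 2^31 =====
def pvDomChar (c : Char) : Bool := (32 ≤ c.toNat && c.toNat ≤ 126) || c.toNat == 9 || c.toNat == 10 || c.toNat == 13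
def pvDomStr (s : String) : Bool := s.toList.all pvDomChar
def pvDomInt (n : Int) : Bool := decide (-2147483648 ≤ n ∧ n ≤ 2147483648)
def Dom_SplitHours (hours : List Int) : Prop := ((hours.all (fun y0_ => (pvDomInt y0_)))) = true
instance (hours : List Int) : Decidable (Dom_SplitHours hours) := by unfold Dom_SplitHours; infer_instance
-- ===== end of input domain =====

-- B does the grouping in ONE pass with two scalars (start, prev), emitting triples directly;
-- A builds the list of run sublists first and maps them to triples in a second pass.

-- ===== PORT A =====
-- the loop 'for i in range(1,len(hours))' carried as structural recursion over the tail,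
-- with prev = hours[i-1]; periods are always nonempty, so headD/getLastD are exact for
-- period[0] / period[-1].
def SplitHoursLoopA : List Int → Int → List (List Int) → List Int → List (List Int) × List Int
  | [], _, slist, period => (slist, period)
  | h :: t, prev, slist, period =>
      if h - prev = 1 then SplitHoursLoopA t h slist (period ++ [h])
      else SplitHoursLoopA t h (slist ++ [period]) [h]

-- result.append([period[0], period[-1]-period[0], period[-1]]); periods are nonempty
def pvTriple (p : List Int) : List Int := [p.headD 0, p.getLastD 0 - p.headD 0, p.getLastD 0]

def SplitHours (hours : List Int) : List (List Int) :=
  match hours with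
  | [] => []  -- unreachable under Pre_: Python raises IndexError indexing the first element
  | h0 :: rest =>
    let (slist, period) := SplitHoursLoopA rest h0 [] [h0]
    (slist ++ [period]).map pvTriple

-- ===== PORT B =====
def SplitHoursLoopB : List Int → Int → Int → List (List Int) → List (List Int)
  | [], start, prev, acc => acc ++ [[start, prev - start, prev]]
  | h :: t, start, prev, acc =>
      if h - prev = 1 then SplitHoursLoopB t start h acc
      else SplitHoursLoopB t h h (acc ++ [[start, prev - start, prev]])

def SplitHours_alt (hours : List Int) : List (List Int) :=
  match hours with
  | [] => []  -- unreachable under Pre_: indexing the first element raises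
  | h0 :: rest => SplitHoursLoopB rest h0 h0 []

-- ===== PRECONDITION & SPEC =====
-- Pre_ excludes only the empty list, on which A (and B) raise IndexError indexing the first element.
def Pre_SplitHours (hours : List Int) : Prop := hours ≠ []
instance (hours : List Int) : Decidable (Pre_SplitHours hours) := by unfold Pre_SplitHours; infer_instance
def pvWitness_SplitHours : List Int := [1, 2, 3, 7, 8, 10]

def Spec_SplitHours (hours : List Int) (out : List (List Int)) : Prop := out = SplitHours_alt hours
instance (hours : List Int) (out : List (List Int)) : Decidable (Spec_SplitHours hours out) := by unfold Spec_SplitHours; infer_instance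

-- ===== CLAIM (what is proved, stated in full; the proofs are below) =====
def Claim_equal_SplitHours : Prop := ∀ (hours : List Int), Dom_SplitHours hours → Pre_SplitHours hours → Spec_SplitHours hours (SplitHours hours)

-- ===== LEMMAS AND PROOFS =====

theorem SplitHoursLoop_eq (t : List Int) : ∀ (prev start : Int) (slist : List (List Int)) (period : List Int),
    period ≠ [] → period.head?.getD 0 = start → period.getLast?.getD 0 = prev →
    ((SplitHoursLoopA t prev slist period).1 ++ [(SplitHoursLoopA t prev slist period).2]).map pvTriple
      = SplitHoursLoopB t start prev (slist.map pvTriple) := by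
  induction t with
  | nil =>
    intro prev start slist period hne hh hl
    simp [SplitHoursLoopA, SplitHoursLoopB, pvTriple, hh, hl]
  | cons h t ih =>
    intro prev start slist period hne hh hl
    by_cases hc : h - prev = 1
    · simp only [SplitHoursLoopA, SplitHoursLoopB, if_pos hc]
      apply ih h start slist (period ++ [h])
      · simp
      · cases period with
        | nil => exact absurd rfl hne
        | cons a l => simpa using hh
      · simp
    · simp only [SplitHoursLoopA, SplitHoursLoopB, if_neg hc]
      have := ih h h (slist ++ [period]) [h] (by simp) (by simp) (by simp)
      rw [this]
      simp [pvTriple, hh, hl]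

-- ===== VERDICT (by name: the statement is the Claim_ definition above) =====
theorem SplitHours_spec : Claim_equal_SplitHours := by
  intro hours _ hpre
  cases hours with
  | nil => exact absurd rfl hpre
  | cons h0 rest =>
    show SplitHours (h0 :: rest) = SplitHours_alt (h0 :: rest)
    simp only [SplitHours, SplitHours_alt]
    exact SplitHoursLoop_eq rest h0 h0 [] [h0] (by simp) (by simp) (by simp)
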